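-- pv_equiv track=rewrite | github.com/luis195/TP-Progra-NIM | estrategia_maquina.py | suma_nim
-- ===== SOURCE A (Python) =====
-- def suma_nim(cantidades_por_fila_tablero):
--     """Suma de los resultados con el operador Xor"""
--     resultado = -1
--
--     if len(cantidades_por_fila_tablero) == 1:
--         return cantidades_por_fila_tablero[0]
--     else:
--         resultado_xor = cantidades_por_fila_tablero[0] ^ cantidades_por_fila_tablero[1]
--         cantidades_por_fila_tablero = cantidades_por_fila_tablero[2:]
--         cantidades_por_fila_tablero.insert(0, resultado_xor)
--         resultado = suma_nim(cantidades_por_fila_tablero)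
--
--     return resultado
-- ===== SOURCE B (Python) =====
-- def suma_nim(cantidades_por_fila_tablero):
--     """Suma de los resultados con el operador Xor"""
--     resultado = 0
--     for cantidad in cantidades_por_fila_tablero:
--         resultado ^= cantidad
--     return resultado
-- ===== Notes on version B (the rewrite author's own statement) =====
-- stated objective: faster
-- what changed: Replaces the recursion that rebuilds a sliced copy of the list at every step with a single linear XOR-accumulating loop.
import Mathlib
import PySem

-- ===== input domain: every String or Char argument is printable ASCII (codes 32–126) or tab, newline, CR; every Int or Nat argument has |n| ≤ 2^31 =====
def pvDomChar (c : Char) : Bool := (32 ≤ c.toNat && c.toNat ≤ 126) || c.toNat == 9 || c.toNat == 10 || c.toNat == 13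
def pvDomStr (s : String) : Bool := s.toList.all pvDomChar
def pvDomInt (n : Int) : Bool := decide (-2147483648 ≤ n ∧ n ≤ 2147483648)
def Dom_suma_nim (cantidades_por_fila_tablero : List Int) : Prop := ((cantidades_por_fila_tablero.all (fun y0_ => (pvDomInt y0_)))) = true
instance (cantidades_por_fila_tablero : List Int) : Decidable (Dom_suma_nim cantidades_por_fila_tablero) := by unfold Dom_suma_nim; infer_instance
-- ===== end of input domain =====

-- B replaces A's quadratic slice-and-recurse with one linear XOR-accumulating pass; return-value equivalence on nonempty lists.
-- ===== PORT A =====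
def suma_nim (cantidades_por_fila_tablero : List Int) : Int :=
  match cantidades_por_fila_tablero with
  | [x] => x
  | x :: y :: rest => suma_nim (PySem.Int.bxor x y :: rest)
  | [] => 0  -- Python raises IndexError here; excluded by Pre_suma_nim
  termination_by cantidades_por_fila_tablero.length

-- ===== PORT B =====
def suma_nim_alt (cantidades_por_fila_tablero : List Int) : Int :=
  cantidades_por_fila_tablero.foldl (fun resultado cantidad => PySem.Int.bxor resultado cantidad) 0

-- ===== PRECONDITION & SPEC =====
-- Pre_ excludes only the empty list, on which A raises IndexError (it indexes element 0).
def Pre_suma_nim (cantidades_por_fila_tablero : List Int) : Prop :=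
  cantidades_por_fila_tablero ≠ []
instance (cantidades_por_fila_tablero : List Int) : Decidable (Pre_suma_nim cantidades_por_fila_tablero) := by unfold Pre_suma_nim; infer_instance
def pvWitness_suma_nim : List Int := [3, 5, 7]

def Spec_suma_nim (cantidades_por_fila_tablero : List Int) (out : Int) : Prop := out = suma_nim_alt cantidades_por_fila_tablero
instance (cantidades_por_fila_tablero : List Int) (out : Int) : Decidable (Spec_suma_nim cantidades_por_fila_tablero out) := by unfold Spec_suma_nim; infer_instance

-- ===== CLAIM (what is proved, stated in full; the proofs are below) =====
def Claim_equal_suma_nim : Prop := ∀ (cantidades_por_fila_tablero : List Int), Dom_suma_nim cantidades_por_fila_tablero → Pre_suma_nim cantidades_por_fila_tablero → Spec_suma_nim cantidades_por_fila_tablero (suma_nim cantidades_por_fila_tablero)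

-- ===== LEMMAS AND PROOFS =====
-- A on (acc :: rest) computes the left fold of XOR over rest starting from acc.
theorem suma_nim_cons_foldl (rest : List Int) (acc : Int) :
    suma_nim (acc :: rest) = rest.foldl (fun r c => PySem.Int.bxor r c) acc := by
  induction rest generalizing acc with
  | nil => simp [suma_nim]
  | cons y t ih => simp [suma_nim, List.foldl, ih]

-- ===== VERDICT (by name: the statement is the Claim_ definition above) =====
theorem suma_nim_spec : Claim_equal_suma_nim := by
  intro l _ hpre
  unfold Spec_suma_nim suma_nim_alt
  cases l with
  | nil => exact absurd rfl hpre
  | cons x xs =>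
      rw [suma_nim_cons_foldl]
      simp [List.foldl, PySem.Int.bxor_comm 0 x]
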